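-- pv_equiv track=rewrite | github.com/nikitalita/n76e003-cw-firmware | mocks/mock_ss2_sim.py | _stuff_data
-- ===== SOURCE A (Python) =====
-- FRAME_BYTE = 0x00
--
-- def _stuff_data(buf):
--     """Apply COBS to buf
--     """
--     l = len(buf)
--     ptr = 0
--     last = 0
--     for i in range(1, l):
--         if (buf[i] == FRAME_BYTE):
--             buf[last] = i - last
--             last = i
--             # target_logger.debug("Stuffing byte {}".format(i))
--     return buf
-- ===== SOURCE B (Python) =====
-- FRAME_BYTE = 0x00
--
-- def _stuff_data(buf):
--     """Apply COBS to buf (two-phase: gather zero anchors, then write gaps)."""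
--     starts = [0] + [i for i in range(1, len(buf)) if buf[i] == FRAME_BYTE]
--     for a, b in zip(starts, starts[1:]):
--         buf[a] = b - a
--     return buf
-- ===== Notes on version B (the rewrite author's own statement) =====
-- stated objective: alternative
-- what changed: Replaces A's single stateful scan (carrying a 'last anchor' variable and writing as it goes) with a two-phase decomposition: first gather the anchor positions (index zero plus every zero-byte index), then write each consecutive gap in a second pass over zipped anchor pairs.
import Mathlib
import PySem

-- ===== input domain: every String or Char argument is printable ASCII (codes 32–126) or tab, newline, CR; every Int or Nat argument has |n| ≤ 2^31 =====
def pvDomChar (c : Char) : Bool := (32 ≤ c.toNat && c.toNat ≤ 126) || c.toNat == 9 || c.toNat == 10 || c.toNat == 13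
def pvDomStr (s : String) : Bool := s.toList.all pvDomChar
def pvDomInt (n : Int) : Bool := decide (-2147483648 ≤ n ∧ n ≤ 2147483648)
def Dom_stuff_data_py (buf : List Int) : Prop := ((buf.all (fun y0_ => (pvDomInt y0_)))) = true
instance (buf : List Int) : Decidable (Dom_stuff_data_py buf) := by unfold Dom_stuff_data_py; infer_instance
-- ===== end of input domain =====

-- B replaces A's single stateful scan with a two-phase anchor-list decomposition (same return value;
-- both Pythons mutate buf in place identically, the proved equivalence is about the returned list).

-- ===== PORT A =====
-- one loop over range(1, len(buf)) carrying state (buf, last); writes buf[last] = i - last at each zero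
def stuff_data_py (buf : List Int) : List Int :=
  let l : Int := PySem.List.len buf
  ((PySem.List.pyRange 1 l 1).foldl
    (fun (s : List Int × Int) i =>
      if PySem.List.pyGetD s.1 i 0 == 0 then
        (PySem.List.pySetD s.1 s.2 (i - s.2), i)
      else s) (buf, 0)).1

-- ===== PORT B =====
-- phase 1: starts = [0] + [i for i in range(1, len(buf)) if buf[i] == 0]; phase 2: write gaps over zipped pairs
def stuff_data_py_alt (buf : List Int) : List Int :=
  let starts : List Int :=
    0 :: (PySem.List.pyRange 1 (PySem.List.len buf) 1).filter
          (fun i => PySem.List.pyGetD buf i 0 == 0)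
  (starts.zip starts.tail).foldl
    (fun cur p => PySem.List.pySetD cur p.1 (p.2 - p.1)) buf

-- ===== PRECONDITION & SPEC =====
def Spec_stuff_data_py (buf : List Int) (out : List Int) : Prop := out = stuff_data_py_alt buf
instance (buf : List Int) (out : List Int) : Decidable (Spec_stuff_data_py buf out) := by unfold Spec_stuff_data_py; infer_instance

-- ===== CLAIM (what is proved, stated in full; the proofs are below) =====
def Claim_equal_stuff_data_py : Prop := ∀ (buf : List Int), Dom_stuff_data_py buf → Spec_stuff_data_py buf (stuff_data_py buf)

-- ===== LEMMAS AND PROOFS =====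

-- pairs of consecutive elements of (a :: zs) grow by one pair when a zero index is appended
theorem pv_zip_shift (a : Int) (zs : List Int) (x : Int) :
    ((a :: (zs ++ [x])).zip (zs ++ [x])) = (a :: zs).zip zs ++ [(zs.getLastD a, x)] := by
  induction zs generalizing a with
  | nil => simp
  | cons b t ih =>
    simp only [List.cons_append, List.zip_cons_cons, ih b, List.cons.injEq, true_and]
    cases t with
    | nil => simp
    | cons c u =>
      obtain ⟨y, hy⟩ := Option.isSome_iff_exists.mp (List.getLast?_isSome.mpr (by simp : (c :: u) ≠ []))
      simp [hy]

-- proof-only abbreviations for the two fold bodies and the anchor list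
def pvStep (s : List Int × Int) (i : Int) : List Int × Int :=
  if PySem.List.pyGetD s.1 i 0 == 0 then (PySem.List.pySetD s.1 s.2 (i - s.2), i) else s

def pvWrite (cur : List Int) (p : Int × Int) : List Int := PySem.List.pySetD cur p.1 (p.2 - p.1)

def pvZs (buf : List Int) (n : Nat) : List Int :=
  (PySem.List.pyRange 1 (n : Int) 1).filter (fun i => PySem.List.pyGetD buf i 0 == 0)

def pvSt (buf : List Int) (n : Nat) : List Int × Int :=
  (PySem.List.pyRange 1 (n : Int) 1).foldl pvStep (buf, 0)

theorem pv_range_split (n : Nat) (h1 : 1 ≤ n) :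
    PySem.List.pyRange 1 ((n + 1 : Nat) : Int) 1 = PySem.List.pyRange 1 (n : Int) 1 ++ [(n : Int)] := by
  rw [PySem.List.pyRange_one_append 1 (n : Int) ((n + 1 : Nat) : Int) (by exact_mod_cast h1) (by push_cast; omega)]
  congr 1
  simp [PySem.List.pyRange_one]

-- main loop invariant tying A's fold state after range(1, n) to B's write-fold over the anchors seen so far
theorem pv_invariant (buf : List Int) (n : Nat) (hn : n ≤ buf.length) :
    (pvSt buf n).1 = ((0 :: pvZs buf n).zip (pvZs buf n)).foldl pvWrite buf
    ∧ (pvSt buf n).2 = (pvZs buf n).getLastD 0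
    ∧ (pvSt buf n).1.length = buf.length
    ∧ (∀ j : Nat, n ≤ j → (pvSt buf n).1[j]? = buf[j]?)
    ∧ 0 ≤ (pvSt buf n).2 ∧ (pvSt buf n).2 < ((max n 1 : Nat) : Int) := by
  induction n with
  | zero => simp [pvSt, pvZs]
  | succ n ih =>
    by_cases h1 : 1 ≤ n
    case neg =>
      interval_cases n
      simp [pvSt, pvZs]
    case pos =>
      obtain ⟨hA, hlast, hlen, hagree, hpos, hlt⟩ := ih (by omega)
      have hmax : (max n 1 : Nat) = n := by omega
      rw [hmax] at hlt
      have hsplit := pv_range_split n h1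
      have hst : pvSt buf (n + 1) = pvStep (pvSt buf n) (n : Int) := by
        rw [pvSt, pvSt, hsplit, List.foldl_append]; rfl
      have hzs : pvZs buf (n + 1) =
          pvZs buf n ++ (if PySem.List.pyGetD buf (n : Int) 0 == 0 then [(n : Int)] else []) := by
        rw [pvZs, pvZs, hsplit, List.filter_append]
        congr 1
        simp only [List.filter_cons, List.filter_nil]
      -- reading index n from the current state equals reading it from the original buf
      have hread : PySem.List.pyGetD (pvSt buf n).1 (n : Int) 0 = PySem.List.pyGetD buf (n : Int) 0 := by
        rw [PySem.List.pyGetD_natCast, PySem.List.pyGetD_natCast,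
            List.getD_eq_getElem?_getD, List.getD_eq_getElem?_getD, hagree n le_rfl]
      by_cases hp : PySem.List.pyGetD buf (n : Int) 0 == 0
      case pos =>
        have hstep : pvSt buf (n + 1) =
            (PySem.List.pySetD (pvSt buf n).1 (pvSt buf n).2 ((n : Int) - (pvSt buf n).2), (n : Int)) := by
          rw [hst, pvStep, hread, if_pos hp]
        rw [hzs, if_pos hp] at *
        refine ⟨?_, ?_, ?_, ?_, ?_, ?_⟩
        · rw [hstep, pv_zip_shift 0 (pvZs buf n) (n : Int), List.foldl_append, ← hA, ← hlast]
          rfl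
        · rw [hstep]
          simp
        · rw [hstep]
          simp [PySem.List.length_pySetD, hlen]
        · intro j hj
          rw [hstep]
          rw [PySem.List.pySetD_of_nonneg _ _ hpos,
              List.getElem?_set_ne (by omega)]
          exact hagree j (by omega)
        · rw [hstep]; positivity
        · rw [hstep]; push_cast; omega
      case neg =>
        have hstep : pvSt buf (n + 1) = pvSt buf n := by
          rw [hst, pvStep, hread, if_neg hp]
        rw [hzs, if_neg hp, List.append_nil] at *
        exact ⟨by rw [hstep]; exact hA, by rw [hstep]; exact hlast, by rw [hstep]; exact hlen,
          fun j hj => by rw [hstep]; exact hagree j (by omega), by rw [hstep]; exact hpos,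
          by rw [hstep]; push_cast; omega⟩



-- ===== VERDICT (by name: the statement is the Claim_ definition above) =====
theorem stuff_data_py_spec : Claim_equal_stuff_data_py := by
  intro buf _
  unfold Spec_stuff_data_py stuff_data_py stuff_data_py_alt
  have h := pv_invariant buf buf.length le_rfl
  simp only [PySem.List.len_eq] at *
  exact h.1
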